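-- pv_equiv track=rewrite | github.com/Mrabdel-dev/automat | PdsLastUP.py | tubeRound
-- ===== SOURCE A (Python) =====
-- def tubeRound(num):
--     T = 1
--     for i in range(0, num):
--         x = (i % 12) + 1
--         if x % 12 == 0:
--             if T == 24:
--                 T = 1
--             else:
--                 T += 1
--     return T
-- ===== SOURCE B (Python) =====
-- def tubeRound(num):
--     steps = max(num, 0) // 12
--     return steps % 24 + 1
-- ===== Notes on version B (the rewrite author's own statement) =====
-- stated objective: faster
-- what changed: Replaced the linear loop that advances a wrapping counter once per twelve iterations with a closed-form floor-division-and-modulo formula.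
import Mathlib
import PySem

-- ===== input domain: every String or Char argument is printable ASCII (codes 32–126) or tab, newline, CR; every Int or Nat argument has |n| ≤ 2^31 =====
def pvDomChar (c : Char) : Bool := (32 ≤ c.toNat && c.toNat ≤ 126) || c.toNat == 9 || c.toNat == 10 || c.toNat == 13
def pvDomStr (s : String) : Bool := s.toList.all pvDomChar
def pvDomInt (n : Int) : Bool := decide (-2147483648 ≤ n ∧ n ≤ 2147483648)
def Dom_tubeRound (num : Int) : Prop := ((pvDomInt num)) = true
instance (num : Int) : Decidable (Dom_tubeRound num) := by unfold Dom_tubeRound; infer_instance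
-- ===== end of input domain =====

-- B replaces A's O(num) counter loop with the closed form max(num,0)//12 % 24 + 1 (faster, O(1)).


-- ===== PORT A =====
def tubeRound (num : Int) : Int :=
  (PySem.List.pyRange 0 num 1).foldl
    (fun T i =>
      let x := PySem.Int.mod i 12 + 1
      if PySem.Int.mod x 12 = 0 then
        if T = 24 then 1 else T + 1
      else T)
    1

-- ===== PORT B =====
def tubeRound_alt (num : Int) : Int :=
  let steps := PySem.Int.floordiv (max num 0) 12
  PySem.Int.mod steps 24 + 1

-- ===== PRECONDITION & SPEC =====
def Spec_tubeRound (num : Int) (out : Int) : Prop := out = tubeRound_alt num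
instance (num : Int) (out : Int) : Decidable (Spec_tubeRound num out) := by unfold Spec_tubeRound; infer_instance

-- ===== CLAIM (what is proved, stated in full; the proofs are below) =====
def Claim_equal_tubeRound : Prop := ∀ (num : Int), Dom_tubeRound num → Spec_tubeRound num (tubeRound num)

-- ===== LEMMAS AND PROOFS =====

-- Loop characterisation: over range(0, n) (n a natural), A's fold computes n/12 % 24 + 1.
lemma tubeRound_loop (n : Nat) :
    (PySem.List.pyRange 0 n 1).foldl
      (fun T i =>
        let x := PySem.Int.mod i 12 + 1
        if PySem.Int.mod x 12 = 0 then
          if T = 24 then 1 else T + 1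
        else T)
      1 = ((n : Int) / 12 % 24) + 1 := by
  induction n with
  | zero => simp
  | succ n ih =>
    have h : ((n : Int) + 1) = (((n + 1 : Nat) : Int)) := by push_cast; ring
    have hr := PySem.List.pyRange_one_succ_right (a := 0) (b := (n : Int)) (by positivity)
    rw [h] at hr
    rw [hr, List.foldl_append, ih]
    simp only [List.foldl_cons, List.foldl_nil]
    rw [PySem.Int.mod_eq_emod_of_pos (by norm_num), PySem.Int.mod_eq_emod_of_pos (by norm_num)]
    push_cast
    split_ifs with h1 h2 <;> omega

theorem tubeRound_spec' (num : Int) : tubeRound num = tubeRound_alt num := by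
  unfold tubeRound tubeRound_alt
  rcases le_or_gt num 0 with h | h
  · rw [PySem.List.pyRange_one_eq_nil h]
    have hm : max num 0 = 0 := by omega
    simp [hm, PySem.Int.floordiv, PySem.Int.mod, Int.fdiv, Int.fmod]
  · have hn : num = ((num.toNat : Nat) : Int) := by omega
    rw [hn, tubeRound_loop]
    have hm : max ((num.toNat : Nat) : Int) 0 = ((num.toNat : Nat) : Int) := by omega
    dsimp only
    rw [hm, PySem.Int.floordiv_eq_ediv_of_pos (by norm_num),
        PySem.Int.mod_eq_emod_of_pos (by norm_num)]

-- ===== VERDICT (by name: the statement is the Claim_ definition above) =====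
theorem tubeRound_spec : Claim_equal_tubeRound := by
  intro num _
  exact tubeRound_spec' num
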